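-- pv_equiv track=rewrite | github.com/Omega-Reasoning/ARC-Task-Generators-Inventory | arc_training_NS/taskde1cd16c.py | _reconstruct_regions
-- ===== SOURCE A (Python) =====
-- from typing import Dict, Any, Tuple, List
--
-- def _reconstruct_regions(height: int, width: int, num_regions: int, split_type: str) -> List[List[Tuple[int, int]]]:
--     """Reconstruct regions based on grid dimensions and split type."""
--     regions = []
--
--     if num_regions == 3:
--         if split_type == 'horizontal':
--             h1 = height // 3
--             h2 = 2 * height // 3
--             regions.append([(r, c) for r in range(h1) for c in range(width)])
--             regions.append([(r, c) for r in range(h1, h2) for c in range(width)])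
--             regions.append([(r, c) for r in range(h2, height) for c in range(width)])
--         elif split_type == 'vertical':
--             w1 = width // 3
--             w2 = 2 * width // 3
--             regions.append([(r, c) for r in range(height) for c in range(w1)])
--             regions.append([(r, c) for r in range(height) for c in range(w1, w2)])
--             regions.append([(r, c) for r in range(height) for c in range(w2, width)])
--         else:  # mixed
--             h_mid = height // 2
--             w_mid = width // 2
--             regions.append([(r, c) for r in range(h_mid) for c in range(width)])
--             regions.append([(r, c) for r in range(h_mid, height) for c in range(w_mid)])
--             regions.append([(r, c) for r in range(h_mid, height) for c in range(w_mid, width)])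
--     else:  # num_regions == 4
--         h_mid = height // 2
--         w_mid = width // 2
--         regions.append([(r, c) for r in range(h_mid) for c in range(w_mid)])
--         regions.append([(r, c) for r in range(h_mid) for c in range(w_mid, width)])
--         regions.append([(r, c) for r in range(h_mid, height) for c in range(w_mid)])
--         regions.append([(r, c) for r in range(h_mid, height) for c in range(w_mid, width)])
--
--     return regions
-- ===== SOURCE B (Python) =====
-- def _reconstruct_regions(height, width, num_regions, split_type):
--     """Enumerate the whole grid once (row-major), then select each region from that single cell list by a membership test."""
--     cells = [(r, c) for r in range(height) for c in range(width)]
--     if num_regions == 3: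
--         if split_type == 'horizontal':
--             h1, h2 = height // 3, 2 * height // 3
--             return [[p for p in cells if p[0] < h1],
--                     [p for p in cells if h1 <= p[0] < h2],
--                     [p for p in cells if h2 <= p[0]]]
--         elif split_type == 'vertical':
--             w1, w2 = width // 3, 2 * width // 3
--             return [[p for p in cells if p[1] < w1],
--                     [p for p in cells if w1 <= p[1] < w2],
--                     [p for p in cells if w2 <= p[1]]]
--         else:
--             h_mid, w_mid = height // 2, width // 2
--             return [[p for p in cells if p[0] < h_mid],
--                     [p for p in cells if h_mid <= p[0] and p[1] < w_mid],
--                     [p for p in cells if h_mid <= p[0] and w_mid <= p[1]]]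
--     else:
--         h_mid, w_mid = height // 2, width // 2
--         return [[p for p in cells if p[0] < h_mid and p[1] < w_mid],
--                 [p for p in cells if p[0] < h_mid and w_mid <= p[1]],
--                 [p for p in cells if h_mid <= p[0] and p[1] < w_mid],
--                 [p for p in cells if h_mid <= p[0] and w_mid <= p[1]]]
-- ===== Notes on version B (the rewrite author's own statement) =====
-- stated objective: alternative
-- what changed: B enumerates the whole grid once in row-major order and extracts each region from that single cell list by a per-branch membership classifier (select-by-predicate), instead of A's direct per-region enumeration from each region's own range bounds.
import Mathlib
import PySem

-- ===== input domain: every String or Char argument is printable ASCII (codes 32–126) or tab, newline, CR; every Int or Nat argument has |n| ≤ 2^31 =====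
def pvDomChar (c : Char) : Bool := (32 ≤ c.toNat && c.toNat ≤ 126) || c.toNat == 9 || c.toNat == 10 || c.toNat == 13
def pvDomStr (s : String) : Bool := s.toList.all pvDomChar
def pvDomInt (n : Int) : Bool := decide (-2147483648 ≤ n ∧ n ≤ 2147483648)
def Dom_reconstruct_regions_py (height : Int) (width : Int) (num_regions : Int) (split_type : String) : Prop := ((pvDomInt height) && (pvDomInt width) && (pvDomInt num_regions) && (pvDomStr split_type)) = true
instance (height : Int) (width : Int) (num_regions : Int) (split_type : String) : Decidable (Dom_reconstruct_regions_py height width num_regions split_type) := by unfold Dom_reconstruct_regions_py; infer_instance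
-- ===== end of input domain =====

-- B enumerates the whole grid once in row-major order and selects each region out of that
-- single list by a membership predicate, instead of A's per-region bounded enumerations
-- (objective: alternative algorithm, same asymptotic cost).

-- ===== PORT A =====
-- each 'regions.append([(r,c) for r in range(a,b) for c in range(u,v)])' is this double loop
def reconstruct_regions_py (height : Int) (width : Int) (num_regions : Int) (split_type : String) : List (List (Int × Int)) :=
  let regions : List (List (Int × Int)) := []
  if num_regions == 3 then
    if split_type == "horizontal" then
      let h1 := PySem.Int.floordiv height 3
      let h2 := PySem.Int.floordiv (2 * height) 3
      let regions := regions ++ [(PySem.List.pyRange 0 h1 1).flatMap (fun r => (PySem.List.pyRange 0 width 1).map (fun c => (r, c)))]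
      let regions := regions ++ [(PySem.List.pyRange h1 h2 1).flatMap (fun r => (PySem.List.pyRange 0 width 1).map (fun c => (r, c)))]
      let regions := regions ++ [(PySem.List.pyRange h2 height 1).flatMap (fun r => (PySem.List.pyRange 0 width 1).map (fun c => (r, c)))]
      regions
    else if split_type == "vertical" then
      let w1 := PySem.Int.floordiv width 3
      let w2 := PySem.Int.floordiv (2 * width) 3
      let regions := regions ++ [(PySem.List.pyRange 0 height 1).flatMap (fun r => (PySem.List.pyRange 0 w1 1).map (fun c => (r, c)))]
      let regions := regions ++ [(PySem.List.pyRange 0 height 1).flatMap (fun r => (PySem.List.pyRange w1 w2 1).map (fun c => (r, c)))]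
      let regions := regions ++ [(PySem.List.pyRange 0 height 1).flatMap (fun r => (PySem.List.pyRange w2 width 1).map (fun c => (r, c)))]
      regions
    else  -- mixed
      let h_mid := PySem.Int.floordiv height 2
      let w_mid := PySem.Int.floordiv width 2
      let regions := regions ++ [(PySem.List.pyRange 0 h_mid 1).flatMap (fun r => (PySem.List.pyRange 0 width 1).map (fun c => (r, c)))]
      let regions := regions ++ [(PySem.List.pyRange h_mid height 1).flatMap (fun r => (PySem.List.pyRange 0 w_mid 1).map (fun c => (r, c)))]
      let regions := regions ++ [(PySem.List.pyRange h_mid height 1).flatMap (fun r => (PySem.List.pyRange w_mid width 1).map (fun c => (r, c)))]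
      regions
  else  -- num_regions == 4
    let h_mid := PySem.Int.floordiv height 2
    let w_mid := PySem.Int.floordiv width 2
    let regions := regions ++ [(PySem.List.pyRange 0 h_mid 1).flatMap (fun r => (PySem.List.pyRange 0 w_mid 1).map (fun c => (r, c)))]
    let regions := regions ++ [(PySem.List.pyRange 0 h_mid 1).flatMap (fun r => (PySem.List.pyRange w_mid width 1).map (fun c => (r, c)))]
    let regions := regions ++ [(PySem.List.pyRange h_mid height 1).flatMap (fun r => (PySem.List.pyRange 0 w_mid 1).map (fun c => (r, c)))]
    let regions := regions ++ [(PySem.List.pyRange h_mid height 1).flatMap (fun r => (PySem.List.pyRange w_mid width 1).map (fun c => (r, c)))]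
    regions

-- ===== PORT B =====
-- Source B: enumerate the grid once, then select each region from 'cells' by a membership test
def reconstruct_regions_py_alt (height : Int) (width : Int) (num_regions : Int) (split_type : String) : List (List (Int × Int)) :=
  let cells := (PySem.List.pyRange 0 height 1).flatMap (fun r => (PySem.List.pyRange 0 width 1).map (fun c => (r, c)))
  if num_regions == 3 then
    if split_type == "horizontal" then
      let h1 := PySem.Int.floordiv height 3
      let h2 := PySem.Int.floordiv (2 * height) 3
      [cells.filter (fun p => decide (p.1 < h1)),
       cells.filter (fun p => decide (h1 ≤ p.1 ∧ p.1 < h2)),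
       cells.filter (fun p => decide (h2 ≤ p.1))]
    else if split_type == "vertical" then
      let w1 := PySem.Int.floordiv width 3
      let w2 := PySem.Int.floordiv (2 * width) 3
      [cells.filter (fun p => decide (p.2 < w1)),
       cells.filter (fun p => decide (w1 ≤ p.2 ∧ p.2 < w2)),
       cells.filter (fun p => decide (w2 ≤ p.2))]
    else  -- mixed
      let h_mid := PySem.Int.floordiv height 2
      let w_mid := PySem.Int.floordiv width 2
      [cells.filter (fun p => decide (p.1 < h_mid)),
       cells.filter (fun p => decide (h_mid ≤ p.1 ∧ p.2 < w_mid)),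
       cells.filter (fun p => decide (h_mid ≤ p.1 ∧ w_mid ≤ p.2))]
  else  -- num_regions == 4
    let h_mid := PySem.Int.floordiv height 2
    let w_mid := PySem.Int.floordiv width 2
    [cells.filter (fun p => decide (p.1 < h_mid ∧ p.2 < w_mid)),
     cells.filter (fun p => decide (p.1 < h_mid ∧ w_mid ≤ p.2)),
     cells.filter (fun p => decide (h_mid ≤ p.1 ∧ p.2 < w_mid)),
     cells.filter (fun p => decide (h_mid ≤ p.1 ∧ w_mid ≤ p.2))]

-- ===== PRECONDITION & SPEC =====
def Spec_reconstruct_regions_py (height : Int) (width : Int) (num_regions : Int) (split_type : String) (out : List (List (Int × Int))) : Prop := out = reconstruct_regions_py_alt height width num_regions split_type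
instance (height : Int) (width : Int) (num_regions : Int) (split_type : String) (out : List (List (Int × Int))) : Decidable (Spec_reconstruct_regions_py height width num_regions split_type out) := by unfold Spec_reconstruct_regions_py; infer_instance

-- ===== CLAIM (what is proved, stated in full; the proofs are below) =====
def Claim_equal_reconstruct_regions_py : Prop := ∀ (height : Int) (width : Int) (num_regions : Int) (split_type : String), Dom_reconstruct_regions_py height width num_regions split_type → Spec_reconstruct_regions_py height width num_regions split_type (reconstruct_regions_py height width num_regions split_type)

-- ===== LEMMAS AND PROOFS =====

-- a Bool predicate equivalent on [a,b) to membership in [u,v) filters a range to that subrange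
lemma pvFilter_pyRange (a b u v : Int) (p : Int → Bool)
    (hau : a ≤ u) (huv : u ≤ v) (hvb : v ≤ b)
    (hp : ∀ x, a ≤ x → x < b → (p x = true ↔ (u ≤ x ∧ x < v))) :
    (PySem.List.pyRange a b 1).filter p = PySem.List.pyRange u v 1 := by
  rw [PySem.List.pyRange_one_append a u b hau (le_trans huv hvb),
      PySem.List.pyRange_one_append u v b huv hvb, List.filter_append, List.filter_append]
  have e1 : (PySem.List.pyRange a u 1).filter p = [] := by
    apply List.filter_eq_nil_iff.mpr
    intro x hx
    rw [PySem.List.mem_pyRange_one] at hx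
    have := hp x (by omega) (by omega)
    simp only [Bool.not_eq_true]
    by_contra hc
    have := this.mp (by revert hc; cases p x <;> simp)
    omega
  have e2 : (PySem.List.pyRange u v 1).filter p = PySem.List.pyRange u v 1 := by
    apply List.filter_eq_self.mpr
    intro x hx
    rw [PySem.List.mem_pyRange_one] at hx
    exact (hp x (by omega) (by omega)).mpr (by omega)
  have e3 : (PySem.List.pyRange v b 1).filter p = [] := by
    apply List.filter_eq_nil_iff.mpr
    intro x hx
    rw [PySem.List.mem_pyRange_one] at hx
    have := hp x (by omega) (by omega)
    simp only [Bool.not_eq_true]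
    by_contra hc
    have := this.mp (by revert hc; cases p x <;> simp)
    omega
  rw [e1, e2, e3, List.nil_append, List.append_nil]

-- filtering the row-major grid by a rectangle-membership predicate yields the
-- row-major enumeration of that rectangle
lemma pvRegion (h w a b u v : Int) (P : Int × Int → Bool)
    (ha : 0 ≤ a) (hab : a ≤ b) (hbh : b ≤ h) (hu : 0 ≤ u) (huv : u ≤ v) (hvw : v ≤ w)
    (hP : ∀ r c, 0 ≤ r → r < h → 0 ≤ c → c < w →
        (P (r, c) = true ↔ (a ≤ r ∧ r < b ∧ u ≤ c ∧ c < v))) :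
    ((PySem.List.pyRange 0 h 1).flatMap (fun r => (PySem.List.pyRange 0 w 1).map (fun c => (r, c)))).filter P
      = (PySem.List.pyRange a b 1).flatMap (fun r => (PySem.List.pyRange u v 1).map (fun c => (r, c))) := by
  rw [List.filter_flatMap]
  have hrw : ∀ r, ((PySem.List.pyRange 0 w 1).map (fun c => (r, c))).filter P
      = ((PySem.List.pyRange 0 w 1).filter (fun c => P (r, c))).map (fun c => (r, c)) := by
    intro r; exact List.filter_map
  rw [PySem.List.pyRange_one_append 0 a h ha (by omega),
      PySem.List.pyRange_one_append a b h hab hbh,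
      List.flatMap_append, List.flatMap_append]
  have e1 : (PySem.List.pyRange 0 a 1).flatMap
      (fun r => ((PySem.List.pyRange 0 w 1).map (fun c => (r, c))).filter P) = [] := by
    apply List.flatMap_eq_nil_iff.mpr
    intro r hr
    rw [PySem.List.mem_pyRange_one] at hr
    rw [hrw r]
    have : (PySem.List.pyRange 0 w 1).filter (fun c => P (r, c)) = [] := by
      apply List.filter_eq_nil_iff.mpr
      intro c hc
      rw [PySem.List.mem_pyRange_one] at hc
      have := hP r c (by omega) (by omega) (by omega) (by omega)
      simp only [Bool.not_eq_true]
      by_contra hcc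
      have := this.mp (by revert hcc; cases P (r, c) <;> simp)
      omega
    rw [this]; rfl
  have e3 : (PySem.List.pyRange b h 1).flatMap
      (fun r => ((PySem.List.pyRange 0 w 1).map (fun c => (r, c))).filter P) = [] := by
    apply List.flatMap_eq_nil_iff.mpr
    intro r hr
    rw [PySem.List.mem_pyRange_one] at hr
    rw [hrw r]
    have : (PySem.List.pyRange 0 w 1).filter (fun c => P (r, c)) = [] := by
      apply List.filter_eq_nil_iff.mpr
      intro c hc
      rw [PySem.List.mem_pyRange_one] at hc
      have := hP r c (by omega) (by omega) (by omega) (by omega)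
      simp only [Bool.not_eq_true]
      by_contra hcc
      have := this.mp (by revert hcc; cases P (r, c) <;> simp)
      omega
    rw [this]; rfl
  have e2 : (PySem.List.pyRange a b 1).flatMap
      (fun r => ((PySem.List.pyRange 0 w 1).map (fun c => (r, c))).filter P) =
      (PySem.List.pyRange a b 1).flatMap (fun r => (PySem.List.pyRange u v 1).map (fun c => (r, c))) := by
    apply List.flatMap_congr
    intro r hr
    rw [PySem.List.mem_pyRange_one] at hr
    rw [hrw r]
    congr 1
    apply pvFilter_pyRange 0 w u v _ hu huv hvw
    intro c hc0 hcw
    have := hP r c (by omega) (by omega) (by omega) (by omega)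
    constructor
    · intro hpc; have := this.mp hpc; omega
    · intro hcc; exact this.mpr (by omega)
  rw [e1, e2, e3, List.nil_append, List.append_nil]

-- the grid list is empty when either dimension is nonpositive
lemma pvGrid_nil (h w : Int) (hd : h ≤ 0 ∨ w ≤ 0) :
    (PySem.List.pyRange 0 h 1).flatMap (fun r => (PySem.List.pyRange 0 w 1).map (fun c => (r, c))) = [] := by
  rcases hd with hd | hd
  · rw [PySem.List.pyRange_one_eq_nil hd]; rfl
  · apply List.flatMap_eq_nil_iff.mpr
    intro r _
    rw [PySem.List.pyRange_one_eq_nil hd]; rfl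

-- a horizontal band with an empty column range is empty
lemma pvBand_nil_col (a b u v : Int) (hvu : v ≤ u) :
    (PySem.List.pyRange a b 1).flatMap (fun r => (PySem.List.pyRange u v 1).map (fun c => (r, c))) = [] := by
  apply List.flatMap_eq_nil_iff.mpr
  intro r _
  rw [PySem.List.pyRange_one_eq_nil hvu]; rfl

-- a band with an empty row range is empty
lemma pvBand_nil_row (a b u v : Int) (hba : b ≤ a) :
    (PySem.List.pyRange a b 1).flatMap (fun r => (PySem.List.pyRange u v 1).map (fun c => (r, c))) = [] := by
  rw [PySem.List.pyRange_one_eq_nil hba]; rfl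

-- ===== VERDICT (by name: the statement is the Claim_ definition above) =====
theorem reconstruct_regions_py_spec : Claim_equal_reconstruct_regions_py := by
  intro height width num_regions split_type _
  unfold Spec_reconstruct_regions_py reconstruct_regions_py reconstruct_regions_py_alt
  have d3 : ∀ a : Int, PySem.Int.floordiv a 3 = a / 3 :=
    fun a => PySem.Int.floordiv_eq_ediv_of_pos (by omega)
  have d2 : ∀ a : Int, PySem.Int.floordiv a 2 = a / 2 :=
    fun a => PySem.Int.floordiv_eq_ediv_of_pos (by omega)
  split_ifs with hn hs1 hs2
  · -- horizontal
    simp only [d3, List.nil_append, List.cons_append]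
    by_cases hpos : 0 < height ∧ 0 < width
    · obtain ⟨hh, hw⟩ := hpos
      congr 1
      · refine (pvRegion height width 0 (height / 3) 0 width _ (by omega) (by omega)
          (by omega) (by omega) (by omega) (by omega) ?_).symm
        intro r c h1 h2 h3 h4
        simp only [decide_eq_true_eq]; omega
      congr 1
      · refine (pvRegion height width (height / 3) (2 * height / 3) 0 width _ (by omega)
          (by omega) (by omega) (by omega) (by omega) (by omega) ?_).symm
        intro r c h1 h2 h3 h4
        simp only [decide_eq_true_eq]; omega
      congr 1
      refine (pvRegion height width (2 * height / 3) height 0 width _ (by omega)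
        (by omega) (by omega) (by omega) (by omega) (by omega) ?_).symm
      intro r c h1 h2 h3 h4
      simp only [decide_eq_true_eq]; omega
    · rw [not_and_or, not_lt, not_lt] at hpos
      rw [pvGrid_nil height width (by omega)]
      simp only [List.filter_nil]
      by_cases hh : height ≤ 0
      · rw [pvBand_nil_row _ _ _ _ (by omega), pvBand_nil_row _ _ _ _ (by omega),
            pvBand_nil_row _ _ _ _ (by omega)]
      · rw [pvBand_nil_col _ _ _ _ (by omega), pvBand_nil_col _ _ _ _ (by omega),
            pvBand_nil_col _ _ _ _ (by omega)]
  · -- vertical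
    simp only [d3, List.nil_append, List.cons_append]
    by_cases hpos : 0 < height ∧ 0 < width
    · obtain ⟨hh, hw⟩ := hpos
      congr 1
      · refine (pvRegion height width 0 height 0 (width / 3) _ (by omega) (by omega)
          (by omega) (by omega) (by omega) (by omega) ?_).symm
        intro r c h1 h2 h3 h4
        simp only [decide_eq_true_eq]; omega
      congr 1
      · refine (pvRegion height width 0 height (width / 3) (2 * width / 3) _ (by omega)
          (by omega) (by omega) (by omega) (by omega) (by omega) ?_).symm
        intro r c h1 h2 h3 h4
        simp only [decide_eq_true_eq]; omega
      congr 1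
      refine (pvRegion height width 0 height (2 * width / 3) width _ (by omega)
        (by omega) (by omega) (by omega) (by omega) (by omega) ?_).symm
      intro r c h1 h2 h3 h4
      simp only [decide_eq_true_eq]; omega
    · rw [not_and_or, not_lt, not_lt] at hpos
      rw [pvGrid_nil height width (by omega)]
      simp only [List.filter_nil]
      by_cases hh : height ≤ 0
      · rw [pvBand_nil_row _ _ _ _ (by omega), pvBand_nil_row _ _ _ _ (by omega),
            pvBand_nil_row _ _ _ _ (by omega)]
      · rw [pvBand_nil_col _ _ _ _ (by omega), pvBand_nil_col _ _ _ _ (by omega),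
            pvBand_nil_col _ _ _ _ (by omega)]
  · -- mixed
    simp only [d2, List.nil_append, List.cons_append]
    by_cases hpos : 0 < height ∧ 0 < width
    · obtain ⟨hh, hw⟩ := hpos
      congr 1
      · refine (pvRegion height width 0 (height / 2) 0 width _ (by omega) (by omega)
          (by omega) (by omega) (by omega) (by omega) ?_).symm
        intro r c h1 h2 h3 h4
        simp only [decide_eq_true_eq]; omega
      congr 1
      · refine (pvRegion height width (height / 2) height 0 (width / 2) _ (by omega)
          (by omega) (by omega) (by omega) (by omega) (by omega) ?_).symm
        intro r c h1 h2 h3 h4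
        simp only [decide_eq_true_eq]; omega
      congr 1
      refine (pvRegion height width (height / 2) height (width / 2) width _ (by omega)
        (by omega) (by omega) (by omega) (by omega) (by omega) ?_).symm
      intro r c h1 h2 h3 h4
      simp only [decide_eq_true_eq]; omega
    · rw [not_and_or, not_lt, not_lt] at hpos
      rw [pvGrid_nil height width (by omega)]
      simp only [List.filter_nil]
      by_cases hh : height ≤ 0
      · rw [pvBand_nil_row _ _ _ _ (by omega), pvBand_nil_row _ _ _ _ (by omega),
            pvBand_nil_row _ _ _ _ (by omega)]
      · rw [pvBand_nil_col _ _ _ _ (by omega), pvBand_nil_col _ _ _ _ (by omega),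
            pvBand_nil_col _ _ _ _ (by omega)]
  · -- num_regions == 4 : quadrants
    simp only [d2, List.nil_append, List.cons_append]
    by_cases hpos : 0 < height ∧ 0 < width
    · obtain ⟨hh, hw⟩ := hpos
      congr 1
      · refine (pvRegion height width 0 (height / 2) 0 (width / 2) _ (by omega) (by omega)
          (by omega) (by omega) (by omega) (by omega) ?_).symm
        intro r c h1 h2 h3 h4
        simp only [decide_eq_true_eq]; omega
      congr 1
      · refine (pvRegion height width 0 (height / 2) (width / 2) width _ (by omega)
          (by omega) (by omega) (by omega) (by omega) (by omega) ?_).symm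
        intro r c h1 h2 h3 h4
        simp only [decide_eq_true_eq]; omega
      congr 1
      · refine (pvRegion height width (height / 2) height 0 (width / 2) _ (by omega)
          (by omega) (by omega) (by omega) (by omega) (by omega) ?_).symm
        intro r c h1 h2 h3 h4
        simp only [decide_eq_true_eq]; omega
      congr 1
      refine (pvRegion height width (height / 2) height (width / 2) width _ (by omega)
        (by omega) (by omega) (by omega) (by omega) (by omega) ?_).symm
      intro r c h1 h2 h3 h4
      simp only [decide_eq_true_eq]; omega
    · rw [not_and_or, not_lt, not_lt] at hpos
      rw [pvGrid_nil height width (by omega)]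
      simp only [List.filter_nil]
      by_cases hh : height ≤ 0
      · rw [pvBand_nil_row _ _ _ _ (by omega), pvBand_nil_row _ _ _ _ (by omega),
            pvBand_nil_row _ _ _ _ (by omega), pvBand_nil_row _ _ _ _ (by omega)]
      · rw [pvBand_nil_col _ _ _ _ (by omega), pvBand_nil_col _ _ _ _ (by omega),
            pvBand_nil_col _ _ _ _ (by omega), pvBand_nil_col _ _ _ _ (by omega)]
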